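-- pv_equiv track=rewrite | github.com/cloudsummer/molhuitu | src/data/molecular_semantics.py | _remove_redundant_chains
-- ===== SOURCE A (Python) =====
-- from typing import Dict, List, Tuple, Set, Optional, Any
--
-- def _remove_redundant_chains(chains: List[Dict]) -> List[Dict]:
--     """Remove redundant chain definitions."""
--     # Simple implementation: remove chains that are subsets of others
--     unique_chains = []
--     for i, chain1 in enumerate(chains):
--         is_subset = False
--         atoms1 = set(chain1['atoms'])
--
--         for j, chain2 in enumerate(chains):
--             if i != j:
--                 atoms2 = set(chain2['atoms'])
--                 if atoms1.issubset(atoms2) and len(atoms1) < len(atoms2):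
--                     is_subset = True
--                     break
--
--         if not is_subset:
--             unique_chains.append(chain1)
--
--     return unique_chains
-- ===== SOURCE B (Python) =====
-- def _remove_redundant_chains(chains):
--     """Remove redundant chain definitions (sort-by-size pruning variant)."""
--     sets = [set(c['atoms']) for c in chains]
--     by_size = sorted(sets, key=len, reverse=True)
--     unique_chains = []
--     for chain, s in zip(chains, sets):
--         redundant = False
--         for t in by_size:
--             if len(t) <= len(s):
--                 break
--             if s <= t:
--                 redundant = True
--                 break
--         if not redundant:
--             unique_chains.append(chain)
--     return unique_chains
-- ===== Notes on version B (the rewrite author's own statement) =====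
-- stated objective: faster
-- what changed: Instead of rebuilding both atom sets inside an all-pairs nested scan with an i!=j guard, B builds each chain's atom set once, sorts the sets by size descending, and for each chain scans that sorted pool, stopping at the first set not strictly larger; a chain is dropped iff its set is a subset of some strictly larger set in the pool.
import Mathlib
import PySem

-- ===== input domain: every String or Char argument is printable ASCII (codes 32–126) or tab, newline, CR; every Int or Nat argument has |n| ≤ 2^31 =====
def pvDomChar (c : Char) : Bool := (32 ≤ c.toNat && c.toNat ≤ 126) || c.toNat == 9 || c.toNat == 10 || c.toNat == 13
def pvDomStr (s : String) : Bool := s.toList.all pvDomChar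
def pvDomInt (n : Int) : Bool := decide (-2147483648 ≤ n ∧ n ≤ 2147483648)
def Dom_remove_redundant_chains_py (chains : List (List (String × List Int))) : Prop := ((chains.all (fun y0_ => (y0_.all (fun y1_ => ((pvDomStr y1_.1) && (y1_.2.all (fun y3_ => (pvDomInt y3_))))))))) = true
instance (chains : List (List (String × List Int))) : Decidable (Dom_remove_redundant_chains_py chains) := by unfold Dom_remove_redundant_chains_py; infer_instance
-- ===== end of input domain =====

-- B replaces A's all-pairs rescan (which rebuilds set(chain2['atoms']) inside the inner loop) by
-- building each atom set once and sorting the sets by size descending, so the inner scan stops at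
-- the first set not strictly larger than the current one; same return value (objective: faster).

-- set(c['atoms']) — shared sub-expression of both sources (dict lookup + set())
def pvAtomSet (c : List (String × List Int)) : List Int :=
  PySem.Set.ofList (((PySem.Dict.mk c).get? "atoms").getD [])

-- ===== PORT A =====
-- inner 'for j, chain2 in enumerate(chains): …' loop with its break
def pvInnerA (i : Int) (atoms1 : List Int) : List (Int × List (String × List Int)) → Bool
  | [] => false
  | (j, chain2) :: rest =>
    if i ≠ j then
      let atoms2 := pvAtomSet chain2
      if PySem.Set.issubset atoms1 atoms2 && decide (atoms1.length < atoms2.length) then true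
      else pvInnerA i atoms1 rest
    else pvInnerA i atoms1 rest

def remove_redundant_chains_py (chains : List (List (String × List Int))) : List (List (String × List Int)) :=
  (PySem.List.enumerate chains).foldl (fun unique_chains p =>
    let atoms1 := pvAtomSet p.2
    let is_subset := pvInnerA p.1 atoms1 (PySem.List.enumerate chains)
    if is_subset then unique_chains else unique_chains ++ [p.2]) []

-- ===== PORT B =====
-- inner 'for t in by_size: …' loop with its two breaks
def pvScanB (s : List Int) : List (List Int) → Bool
  | [] => false
  | t :: rest =>
    if t.length ≤ s.length then false
    else if PySem.Set.issubset s t then true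
    else pvScanB s rest

def remove_redundant_chains_py_alt (chains : List (List (String × List Int))) : List (List (String × List Int)) :=
  let sets := chains.map pvAtomSet
  let by_size := PySem.List.sorted sets (fun t => t.length) true
  (chains.zip sets).foldl (fun unique_chains p =>
    if pvScanB p.2 by_size then unique_chains else unique_chains ++ [p.1]) []

-- ===== PRECONDITION & SPEC =====
-- Pre_: every chain dict has the key 'atoms' (otherwise Python raises KeyError)
def Pre_remove_redundant_chains_py (chains : List (List (String × List Int))) : Prop :=
  ∀ c ∈ chains, ((PySem.Dict.mk c).get? "atoms").isSome = true

instance (chains : List (List (String × List Int))) : Decidable (Pre_remove_redundant_chains_py chains) := by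
  unfold Pre_remove_redundant_chains_py; infer_instance

def pvWitness_remove_redundant_chains_py : (List (List (String × List Int))) :=
  [[("atoms", [1, 2])], [("atoms", [2])]]

def Spec_remove_redundant_chains_py (chains : List (List (String × List Int))) (out : List (List (String × List Int))) : Prop := out = remove_redundant_chains_py_alt chains
instance (chains : List (List (String × List Int))) (out : List (List (String × List Int))) : Decidable (Spec_remove_redundant_chains_py chains out) := by unfold Spec_remove_redundant_chains_py; infer_instance

-- ===== CLAIM (what is proved, stated in full; the proofs are below) =====
def Claim_equal_remove_redundant_chains_py : Prop := ∀ (chains : List (List (String × List Int))), Dom_remove_redundant_chains_py chains → Pre_remove_redundant_chains_py chains → Spec_remove_redundant_chains_py chains (remove_redundant_chains_py chains)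

-- ===== LEMMAS AND PROOFS =====

-- the redundancy test both programs implement: s is a strict subset of some chain's atom set
def pvRed (sets : List (List Int)) (s : List Int) : Bool :=
  sets.any (fun t => PySem.Set.issubset s t && decide (s.length < t.length))

-- membership in enumerate
lemma pv_mem_enumerate {α : Type} (xs : List α) (k : Int) (p : Int × α) :
    p ∈ PySem.List.enumerate xs k ↔ ∃ n : Nat, ∃ h : n < xs.length, p = (k + n, xs[n]) := by
  induction xs generalizing k with
  | nil => simp [PySem.List.enumerate_nil]
  | cons x xs ih =>
    simp only [PySem.List.enumerate_cons, List.mem_cons, ih]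
    constructor
    · rintro (rfl | ⟨n, h, rfl⟩)
      · exact ⟨0, by simp, by simp⟩
      · exact ⟨n + 1, by simp; omega, by simp [Prod.ext_iff]; omega⟩
    · rintro ⟨n, h, rfl⟩
      cases n with
      | zero => left; simp
      | succ n =>
        right
        exact ⟨n, by simpa using h, by simp [Prod.ext_iff]; omega⟩

-- A's inner loop is an 'any' over enumerate
lemma pvInnerA_eq_any (i : Int) (s : List Int) (l : List (Int × List (String × List Int))) :
    pvInnerA i s l =
      l.any (fun p => decide (i ≠ p.1) &&
        (PySem.Set.issubset s (pvAtomSet p.2) && decide (s.length < (pvAtomSet p.2).length))) := by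
  induction l with
  | nil => rfl
  | cons p rest ih =>
    obtain ⟨j, c⟩ := p
    simp only [pvInnerA, List.any_cons, ih]
    by_cases hij : i ≠ j
    · have hd : decide (i ≠ j) = true := by simpa using hij
      rw [if_pos hij, hd]
      cases hc : (PySem.Set.issubset s (pvAtomSet c) && decide (s.length < (pvAtomSet c).length)) <;>
        simp
    · have hd : decide (i ≠ j) = false := by simpa using hij
      rw [if_neg hij, hd]
      simp

-- the i ≠ j guard is immaterial: the j = i entry fails the strict-size test anyway
lemma pvInnerA_eq_pvRed (chains : List (List (String × List Int))) (n : Nat) (hn : n < chains.length) :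
    pvInnerA (n : Int) (pvAtomSet chains[n]) (PySem.List.enumerate chains) =
      pvRed (chains.map pvAtomSet) (pvAtomSet chains[n]) := by
  rw [pvInnerA_eq_any]
  apply Bool.eq_iff_iff.mpr
  simp only [pvRed, List.any_map, List.any_eq_true, Function.comp_apply, Bool.and_eq_true,
    decide_eq_true_eq]
  constructor
  · rintro ⟨p, hp, _, hsub, hlt⟩
    rw [pv_mem_enumerate] at hp
    obtain ⟨m, hm, rfl⟩ := hp
    exact ⟨chains[m], List.getElem_mem hm, hsub, hlt⟩
  · rintro ⟨c, hc, hsub, hlt⟩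
    obtain ⟨m, hm, rfl⟩ := List.getElem_of_mem hc
    have hmn : m ≠ n := by
      rintro rfl
      omega
    refine ⟨((0 : Int) + m, chains[m]), (pv_mem_enumerate _ _ _).mpr ⟨m, hm, rfl⟩, ?_, hsub, hlt⟩
    simp
    omega

-- B's inner loop over the size-sorted pool is the same 'any', given the sizes are nonincreasing
lemma pvScanB_eq_any (s : List Int) (l : List (List Int))
    (hl : l.Pairwise (fun a b => b.length ≤ a.length)) :
    pvScanB s l = l.any (fun t => PySem.Set.issubset s t && decide (s.length < t.length)) := by
  induction l with
  | nil => rfl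
  | cons t rest ih =>
    rw [List.pairwise_cons] at hl
    simp only [pvScanB, List.any_cons]
    by_cases hlen : t.length ≤ s.length
    · rw [if_pos hlen]
      have h1 : decide (s.length < t.length) = false := by simp; omega
      have h2 : rest.any (fun t => PySem.Set.issubset s t && decide (s.length < t.length)) = false := by
        simp only [List.any_eq_false]
        intro u hu
        have := hl.1 u hu
        simp; omega
      simp [h1, h2]
    · rw [if_neg hlen]
      have h1 : decide (s.length < t.length) = true := by simp; omega
      by_cases hsub : PySem.Set.issubset s t = true
      · simp [hsub, h1]
      · simp only [Bool.not_eq_true] at hsub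
        simp [hsub, ih hl.2]

-- 'any' is stable under permutation of the pool
lemma pv_any_perm {α : Type} {l l' : List α} (h : l.Perm l') (p : α → Bool) :
    l.any p = l'.any p := by
  cases hb : l'.any p with
  | false =>
    simp only [List.any_eq_false] at hb ⊢
    exact fun x hx => hb x (h.mem_iff.mp hx)
  | true =>
    simp only [List.any_eq_true] at hb ⊢
    obtain ⟨x, hx, hpx⟩ := hb
    exact ⟨x, h.mem_iff.mpr hx, hpx⟩

-- the 'if redundant: skip else append' fold is a filter-and-project
lemma pv_foldl_filter {α β : Type} (l : List α) (g : α → Bool) (f : α → β) :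
    l.foldl (fun acc x => if g x then acc else acc ++ [f x]) ([] : List β) =
      (l.filter (fun x => ! g x)).map f := by
  have he : (fun (acc : List β) x => if g x then acc else acc ++ [f x]) =
      (fun acc x => if (! g x) = true then acc ++ [f x] else acc) := by
    funext acc x
    cases h : g x <;> simp
  rw [he, PySem.List.foldl_append_if, List.nil_append]

-- filtering enumerate by a property of the value, then projecting, is filtering the list
lemma pv_enum_filter_snd {α : Type} (l : List α) (k : Int) (g : α → Bool) :
    ((PySem.List.enumerate l k).filter (fun p => g p.2)).map (·.2) = l.filter g := by
  induction l generalizing k with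
  | nil => simp [PySem.List.enumerate_nil]
  | cons x xs ih =>
    rw [PySem.List.enumerate_cons]
    cases h : g x <;> simp [h, ih]

-- filtering zip(l, map f l) by the second component, then projecting, is filtering the list
lemma pv_zip_filter_fst {α β : Type} (l : List α) (f : α → β) (g : β → Bool) :
    ((l.zip (l.map f)).filter (fun p => g p.2)).map (·.1) = l.filter (fun x => g (f x)) := by
  induction l with
  | nil => rfl
  | cons x xs ih =>
    simp only [List.map_cons, List.zip_cons_cons]
    cases h : g (f x) <;> simp [h, ih]

lemma pvA_eq_filter (chains : List (List (String × List Int))) :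
    remove_redundant_chains_py chains =
      chains.filter (fun c => ! pvRed (chains.map pvAtomSet) (pvAtomSet c)) := by
  unfold remove_redundant_chains_py
  rw [pv_foldl_filter (PySem.List.enumerate chains)
        (fun p => pvInnerA p.1 (pvAtomSet p.2) (PySem.List.enumerate chains)) (·.2)]
  rw [List.filter_congr (q := fun p => ! pvRed (chains.map pvAtomSet) (pvAtomSet p.2))
        (fun p hp => ?_)]
  · exact pv_enum_filter_snd chains 0 (fun c => ! pvRed (chains.map pvAtomSet) (pvAtomSet c))
  · rw [pv_mem_enumerate] at hp
    obtain ⟨m, hm, rfl⟩ := hp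
    simp only [zero_add]
    rw [pvInnerA_eq_pvRed chains m hm]

lemma pvB_eq_filter (chains : List (List (String × List Int))) :
    remove_redundant_chains_py_alt chains =
      chains.filter (fun c => ! pvRed (chains.map pvAtomSet) (pvAtomSet c)) := by
  have hscan : ∀ s, pvScanB s
      (PySem.List.sorted (chains.map pvAtomSet) (fun t => t.length) true) =
      pvRed (chains.map pvAtomSet) s := by
    intro s
    rw [pvScanB_eq_any s _ (PySem.List.sorted_pairwise_rev (chains.map pvAtomSet) (fun t => t.length))]
    exact pv_any_perm (PySem.List.sorted_perm (chains.map pvAtomSet) (fun t => t.length) true) _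
  show (chains.zip (chains.map pvAtomSet)).foldl (fun unique_chains p =>
      if pvScanB p.2 (PySem.List.sorted (chains.map pvAtomSet) (fun t => t.length) true)
      then unique_chains else unique_chains ++ [p.1]) [] = _
  rw [pv_foldl_filter (chains.zip (chains.map pvAtomSet))
        (fun p => pvScanB p.2 (PySem.List.sorted (chains.map pvAtomSet) (fun t => t.length) true))
        (·.1)]
  rw [List.filter_congr (q := fun p => ! pvRed (chains.map pvAtomSet) p.2)
        (fun p _ => by rw [hscan p.2])]
  exact pv_zip_filter_fst chains pvAtomSet (fun t => ! pvRed (chains.map pvAtomSet) t)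

-- ===== VERDICT (by name: the statement is the Claim_ definition above) =====
theorem remove_redundant_chains_py_spec : Claim_equal_remove_redundant_chains_py := by
  intro chains _ _
  unfold Spec_remove_redundant_chains_py
  rw [pvA_eq_filter, pvB_eq_filter]
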